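-- pv_equiv track=rewrite | github.com/victorvic54/leetcode | 2731_movement_of_robots.py | sumDistance
-- ===== SOURCE A (Python) =====
-- from typing import List
--
-- def sumDistance(nums: List[int], s: str, d: int) -> int:
--     MOD = 10**9 + 7
--     for i in range(len(nums)):
--         if s[i] == "R":
--             nums[i] = (nums[i] + d)
--         elif s[i] == "L":
--             nums[i] = (nums[i] - d)
--
--     nums.sort()
--     prev = 0
--     result = 0
--     for i in range(1, len(nums)):
--         diff = abs(nums[i] - nums[i-1])
--         tmp = (prev + (diff * i)) % MOD
--         result = result + tmp
--         prev = tmp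
--
--     return result % MOD
-- ===== SOURCE B (Python) =====
-- def sumDistance(nums, s, d):
--     MOD = 10**9 + 7
--     moved = sorted(x + d if c == "R" else x - d if c == "L" else x
--                    for x, c in zip(nums, s))
--     n = len(moved)
--     return sum(v * (2 * i - (n - 1)) for i, v in enumerate(moved)) % MOD
-- ===== Notes on version B (the rewrite author's own statement) =====
-- stated objective: simpler
-- what changed: B replaces A's in-place index loop plus rolling modded prefix-of-adjacent-differences accumulator with a zip/sort comprehension and a direct per-element contribution formula sum(v*(2*i-(n-1))) under one final modulo (A mutates nums in place; B does not).
import Mathlib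
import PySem

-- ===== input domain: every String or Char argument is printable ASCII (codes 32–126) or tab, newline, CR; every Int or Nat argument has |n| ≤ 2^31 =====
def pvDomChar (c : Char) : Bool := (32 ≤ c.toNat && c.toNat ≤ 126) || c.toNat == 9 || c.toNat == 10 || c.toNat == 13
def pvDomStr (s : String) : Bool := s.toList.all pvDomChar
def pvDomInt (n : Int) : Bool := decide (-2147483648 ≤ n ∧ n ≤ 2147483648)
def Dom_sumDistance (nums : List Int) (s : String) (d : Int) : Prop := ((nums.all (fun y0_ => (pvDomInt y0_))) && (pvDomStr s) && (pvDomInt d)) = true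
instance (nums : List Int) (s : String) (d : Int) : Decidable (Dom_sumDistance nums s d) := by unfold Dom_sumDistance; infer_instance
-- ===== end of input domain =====

-- B replaces A's in-place index loop and rolling modded prefix accumulator with a zip/sort
-- comprehension and a direct per-element weight formula with one final modulo; A mutates nums
-- in place (B does not) — the equivalence proved here is about the return value only.

-- ===== PORT A =====
def sumDistance (nums : List Int) (s : String) (d : Int) : Int :=
  let nums1 := (PySem.List.pyRange 0 nums.length 1).foldl
    (fun l i =>
      if PySem.Str.pyGet? s i = some 'R' then
        PySem.List.pySetD l i (PySem.List.pyGetD l i 0 + d)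
      else if PySem.Str.pyGet? s i = some 'L' then
        PySem.List.pySetD l i (PySem.List.pyGetD l i 0 - d)
      else l) nums
  let sl := PySem.List.sorted nums1 (fun x => x) false
  let pr := (PySem.List.pyRange 1 sl.length 1).foldl
    (fun (st : Int × Int) i =>
      let diff := |PySem.List.pyGetD sl i 0 - PySem.List.pyGetD sl (i - 1) 0|
      let tmp := PySem.Int.mod (st.1 + diff * i) 1000000007
      (tmp, st.2 + tmp)) (0, 0)
  PySem.Int.mod pr.2 1000000007

-- ===== PORT B =====
def sumDistance_alt (nums : List Int) (s : String) (d : Int) : Int :=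
  let moved := PySem.List.sorted
    ((nums.zip s.toList).map
      (fun p => if p.2 = 'R' then p.1 + d else if p.2 = 'L' then p.1 - d else p.1))
    (fun x => x) false
  let n : Int := moved.length
  PySem.Int.mod
    ((PySem.List.enumerate moved 0).foldl
      (fun acc p => acc + p.2 * (2 * p.1 - (n - 1))) 0)
    1000000007

-- ===== PRECONDITION & SPEC =====
-- Pre_ excludes exactly the inputs where A raises IndexError at s[i] (string shorter than nums).
def Pre_sumDistance (nums : List Int) (s : String) (d : Int) : Prop :=
  nums.length ≤ s.toList.length
instance (nums : List Int) (s : String) (d : Int) : Decidable (Pre_sumDistance nums s d) := by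
  unfold Pre_sumDistance; infer_instance

def pvWitness_sumDistance : List Int × String × Int := ([1, 2], "RL", 3)

def Spec_sumDistance (nums : List Int) (s : String) (d : Int) (out : Int) : Prop :=
  out = sumDistance_alt nums s d
instance (nums : List Int) (s : String) (d : Int) (out : Int) : Decidable (Spec_sumDistance nums s d out) := by
  unfold Spec_sumDistance; infer_instance

-- ===== CLAIM (what is proved, stated in full; the proofs are below) =====
def Claim_equal_sumDistance : Prop := ∀ (nums : List Int) (s : String) (d : Int), Dom_sumDistance nums s d → Pre_sumDistance nums s d → Spec_sumDistance nums s d (sumDistance nums s d)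

-- ===== LEMMAS AND PROOFS =====

-- B's per-robot movement
def pvMove (d : Int) (p : Int × Char) : Int :=
  if p.2 = 'R' then p.1 + d else if p.2 = 'L' then p.1 - d else p.1

-- A's movement loop, processed up to index k, equals B's zip-map on the first k robots
lemma move_loop_aux (nums : List Int) (s : String) (d : Int)
    (h : nums.length ≤ s.toList.length) :
    ∀ (k : Nat), k ≤ nums.length →
    (PySem.List.pyRange 0 (k : Int) 1).foldl
      (fun l i =>
        if PySem.Str.pyGet? s i = some 'R' then
          PySem.List.pySetD l i (PySem.List.pyGetD l i 0 + d)
        else if PySem.Str.pyGet? s i = some 'L' then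
          PySem.List.pySetD l i (PySem.List.pyGetD l i 0 - d)
        else l) nums
    = ((nums.zip s.toList).map (pvMove d)).take k ++ nums.drop k := by
  intro k
  induction k with
  | zero => intro _; simp [PySem.List.pyRange_one_eq_nil]
  | succ k ih =>
    intro hk
    have hk' : k < nums.length := by omega
    have hcs : k < s.toList.length := by omega
    have hstep : ((k+1 : Nat) : Int) = (k : Int) + 1 := by push_cast; ring
    rw [hstep, PySem.List.pyRange_one_succ_right (by positivity), List.foldl_append,
        ih (by omega)]
    have htl : (((nums.zip s.toList).map (pvMove d)).take k).length = k := by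
      rw [List.length_take, List.length_map, List.length_zip]; omega
    have hget : PySem.Str.pyGet? s (k : Int) = some s.toList[k] := by
      simp [List.getElem?_eq_getElem hcs]
    have hgetD : PySem.List.pyGetD (((nums.zip s.toList).map (pvMove d)).take k ++ nums.drop k) (k : Int) 0 = nums[k] := by
      rw [PySem.List.pyGetD_natCast, List.getD_eq_getElem?_getD,
          List.getElem?_append_right (by omega), htl, Nat.sub_self]
      simp [hk']
    have hdropk : nums.drop k = nums[k] :: nums.drop (k+1) := List.drop_eq_getElem_cons hk'
    have hsetE : ∀ v : Int, (((nums.zip s.toList).map (pvMove d)).take k ++ nums.drop k).set k v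
        = ((nums.zip s.toList).map (pvMove d)).take k ++ (v :: nums.drop (k+1)) := by
      intro v
      conv_lhs => rw [List.set_append_right _ _ (by omega), htl, Nat.sub_self, hdropk,
        List.set_cons_zero]
    have htake1 : ((nums.zip s.toList).map (pvMove d)).take (k+1)
        = ((nums.zip s.toList).map (pvMove d)).take k ++ [pvMove d (nums[k], s.toList[k])] := by
      rw [List.take_add_one]
      simp [List.getElem?_eq_getElem (show k < ((nums.zip s.toList).map (pvMove d)).length by
              rw [List.length_map, List.length_zip]; omega),
            List.getElem_zip]
    simp only [List.foldl_cons, List.foldl_nil]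
    rw [hget]
    by_cases hR : s.toList[k] = 'R'
    · rw [if_pos (by simp [hR]), PySem.List.pySetD_natCast, hgetD, hsetE, htake1]
      simp [pvMove, hR]
    · by_cases hL : s.toList[k] = 'L'
      · rw [if_neg (by simp [hR]), if_pos (by simp [hL]), PySem.List.pySetD_natCast, hgetD,
            hsetE, htake1]
        simp [pvMove, hL]
      · rw [if_neg (by simp [hR]), if_neg (by simp [hL]), htake1, hdropk]
        simp [pvMove, hR, hL]

-- B's weighted sum with the weight offset n, the enumerate start and the accumulator explicit
def pvW (n : Int) (l : List Int) (st : Int) (acc : Int) : Int :=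
  (PySem.List.enumerate l st).foldl (fun acc p => acc + p.2 * (2 * p.1 - (n - 1))) acc

lemma pvW_acc (n : Int) (l : List Int) : ∀ st acc, pvW n l st acc = acc + pvW n l st 0 := by
  induction l with
  | nil => intro st acc; simp [pvW, PySem.List.enumerate_nil]
  | cons x t ih =>
    intro st acc
    simp only [pvW, PySem.List.enumerate_cons, List.foldl_cons]
    rw [show ((PySem.List.enumerate t (st+1)).foldl (fun acc p => acc + p.2 * (2 * p.1 - (n - 1))) (acc + x * (2 * st - (n - 1)))) = pvW n t (st+1) (acc + x * (2 * st - (n - 1))) from rfl,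
        show ((PySem.List.enumerate t (st+1)).foldl (fun acc p => acc + p.2 * (2 * p.1 - (n - 1))) (0 + x * (2 * st - (n - 1)))) = pvW n t (st+1) (0 + x * (2 * st - (n - 1))) from rfl,
        ih, ih (st+1) (0 + x * (2 * st - (n - 1)))]
    ring

lemma pvW_shift (n : Int) (l : List Int) : ∀ st acc, pvW (n + 1) l st acc = pvW n l st acc - l.sum := by
  induction l with
  | nil => intro st acc; simp [pvW, PySem.List.enumerate_nil]
  | cons x t ih =>
    intro st acc
    simp only [pvW, PySem.List.enumerate_cons, List.foldl_cons, List.sum_cons]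
    rw [show ∀ a, ((PySem.List.enumerate t (st+1)).foldl (fun acc p => acc + p.2 * (2 * p.1 - (n + 1 - 1))) a) = pvW (n+1) t (st+1) a from fun _ => rfl,
        show ∀ a, ((PySem.List.enumerate t (st+1)).foldl (fun acc p => acc + p.2 * (2 * p.1 - (n - 1))) a) = pvW n t (st+1) a from fun _ => rfl,
        ih, pvW_acc n t (st+1) (acc + x * (2 * st - (n + 1 - 1))), pvW_acc n t (st+1) (acc + x * (2 * st - (n - 1)))]
    ring

lemma pvW_append (n : Int) (l : List Int) (x : Int) (st acc : Int) :
    pvW n (l ++ [x]) st acc = pvW n l st acc + x * (2 * (st + l.length) - (n - 1)) := by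
  simp only [pvW, PySem.List.enumerate_append, List.foldl_append, PySem.List.enumerate_cons,
    PySem.List.enumerate_nil, List.foldl_cons, List.foldl_nil]

-- A's second loop, as a function of the sorted list
def pvFold (sl : List Int) : Int × Int :=
  (PySem.List.pyRange 1 sl.length 1).foldl
    (fun (st : Int × Int) i =>
      let diff := |PySem.List.pyGetD sl i 0 - PySem.List.pyGetD sl (i - 1) 0|
      let tmp := PySem.Int.mod (st.1 + diff * i) 1000000007
      (tmp, st.2 + tmp)) (0, 0)

-- exact (un-modded) value of A's rolling prefix after the whole loop
def pvP (l : List Int) : Int := ((l.length : Int) - 1) * l.getLastD 0 - l.dropLast.sum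

lemma pyGetD_append_left (l : List Int) (x : Int) (i : Int) (h0 : 0 ≤ i) (h1 : i < l.length) :
    PySem.List.pyGetD (l ++ [x]) i 0 = PySem.List.pyGetD l i 0 := by
  rw [PySem.List.pyGetD_eq_getElem _ _ h0 (by simp; omega),
      PySem.List.pyGetD_eq_getElem _ _ h0 (by exact_mod_cast h1)]
  exact List.getElem_append_left (by omega)

lemma pvmod_add (a b A B : Int) (h1 : a % 1000000007 = A % 1000000007)
    (h2 : b % 1000000007 = B % 1000000007) :
    (a + b) % 1000000007 = (A + B) % 1000000007 := by omega

-- the invariant of A's loop on a sorted list: prev is the modded telescoped prefix,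
-- and result is congruent to B's weighted sum
lemma pvFold_inv (l : List Int) (hs : l.Pairwise (· ≤ ·)) :
    (pvFold l).1 = PySem.Int.mod (pvP l) 1000000007 ∧
    PySem.Int.mod (pvFold l).2 1000000007 = PySem.Int.mod (pvW l.length l 0 0) 1000000007 := by
  induction l using List.reverseRecOn with
  | nil => constructor <;> decide
  | append_singleton l x ih =>
    rcases eq_or_ne l [] with rfl | hne
    · simp only [List.nil_append]
      have h1 : pvFold [x] = (0, 0) := by
        simp [pvFold, PySem.List.pyRange_one_eq_nil]
      have h2 : pvP [x] = 0 := by simp [pvP]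
      have h3 : pvW (([x].length : Nat) : Int) [x] 0 0 = 0 := by
        simp [pvW, PySem.List.enumerate_cons, PySem.List.enumerate_nil]
      rw [h1, h2, h3]
      exact ⟨rfl, rfl⟩
    · obtain ⟨hl, -, hcross⟩ := List.pairwise_append.mp hs
      have ih' := ih hl
      set m := l.length with hmdef
      have hm : 1 ≤ m := List.length_pos_of_ne_nil hne
      set la := l.getLast hne with hladef
      have hlax : la ≤ x := hcross la (List.getLast_mem hne) x (by simp)
      have hgx : PySem.List.pyGetD (l ++ [x]) (m : Int) 0 = x := by
        rw [PySem.List.pyGetD_natCast, List.getD_eq_getElem?_getD,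
            List.getElem?_append_right (by omega), Nat.sub_self]
        simp
      have hcast1 : ((m : Int) - 1) = ((m - 1 : Nat) : Int) := by omega
      have hgla : PySem.List.pyGetD (l ++ [x]) ((m : Int) - 1) 0 = la := by
        rw [hcast1, PySem.List.pyGetD_natCast, List.getD_eq_getElem?_getD,
            List.getElem?_append_left (by omega)]
        simp [List.getElem?_eq_getElem (show m - 1 < l.length by omega)]
        rw [hladef, List.getLast_eq_getElem]
      have hlen : (((l ++ [x]).length : Nat) : Int) = (m : Int) + 1 := by
        simp [List.length_append]; omega
      have hpref : (PySem.List.pyRange 1 (m : Int) 1).foldl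
          (fun (st : Int × Int) i =>
            let diff := |PySem.List.pyGetD (l ++ [x]) i 0 - PySem.List.pyGetD (l ++ [x]) (i - 1) 0|
            let tmp := PySem.Int.mod (st.1 + diff * i) 1000000007
            (tmp, st.2 + tmp)) (0, 0) = pvFold l := by
        rw [pvFold]
        apply PySem.List.foldl_congr_mem
        intro acc i hi
        obtain ⟨hi1, hi2⟩ := (PySem.List.mem_pyRange_one).mp hi
        simp only
        rw [pyGetD_append_left l x i (by omega) (by exact_mod_cast hi2),
            pyGetD_append_left l x (i - 1) (by omega) (by omega)]
      have hfold : pvFold (l ++ [x]) =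
          ((PySem.Int.mod ((pvFold l).1 + |x - la| * (m : Int)) 1000000007),
           (pvFold l).2 + PySem.Int.mod ((pvFold l).1 + |x - la| * (m : Int)) 1000000007) := by
        rw [pvFold, hlen, PySem.List.pyRange_one_succ_right (by exact_mod_cast hm),
            List.foldl_append, hpref, List.foldl_cons, List.foldl_nil]
        simp only [hgx, hgla]
      have hsum : l.sum = l.dropLast.sum + la := by
        conv_lhs => rw [← List.dropLast_append_getLast hne]
        simp [hladef]
      have hgld : l.getLastD 0 = la := by
        rw [hladef, List.getLastD_eq_getLast?, List.getLast?_eq_some_getLast hne]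
        rfl
      have harith : pvP l + |x - la| * (m : Int) = (m : Int) * x - l.sum := by
        rw [abs_of_nonneg (by omega), pvP, hgld, hsum, ← hmdef]
        ring
      have hP' : pvP (l ++ [x]) = (m : Int) * x - l.sum := by
        rw [pvP]
        simp [List.length_append, ← hmdef]
      have hMpos : (0:Int) < 1000000007 := by norm_num
      rw [hfold]
      simp only [PySem.Int.mod_eq_emod_of_pos hMpos] at ih' ⊢
      constructor
      · show ((pvFold l).1 + |x - la| * (m : Int)) % 1000000007 = pvP (l ++ [x]) % 1000000007
        rw [ih'.1, hP', ← harith]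
        omega
      · show ((pvFold l).2 + ((pvFold l).1 + |x - la| * (m : Int)) % 1000000007) % 1000000007
            = pvW (((l ++ [x]).length : Nat) : Int) (l ++ [x]) 0 0 % 1000000007
        rw [hlen, pvW_append, pvW_shift]
        have hw : pvW (m : Int) l 0 0 - l.sum + x * (2 * (0 + (m : Int)) - ((m : Int) + 1 - 1))
            = pvW (m : Int) l 0 0 + (x * (2 * (0 + (m : Int)) - ((m : Int) + 1 - 1)) - l.sum) := by ring
        rw [hw]
        apply pvmod_add
        · exact ih'.2
        · rw [ih'.1]
          have e1 : x * (2 * (0 + (m : Int)) - ((m : Int) + 1 - 1)) - l.sum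
              = pvP l + |x - la| * (m : Int) := by rw [harith]; ring
          rw [e1]
          generalize |x - la| * (m : Int) = t
          omega

-- ===== VERDICT (by name: the statement is the Claim_ definition above) =====
theorem sumDistance_spec : Claim_equal_sumDistance := by
  intro nums s d _ hpre
  unfold Pre_sumDistance at hpre
  unfold Spec_sumDistance
  have hml : ((nums.zip s.toList).map (pvMove d)).length = nums.length := by
    rw [List.length_map, List.length_zip]; omega
  have hmove := move_loop_aux nums s d hpre nums.length le_rfl
  have htd : ((nums.zip s.toList).map (pvMove d)).take nums.length ++ nums.drop nums.length
      = (nums.zip s.toList).map (pvMove d) := by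
    rw [List.drop_length, ← hml, List.take_length, List.append_nil]
  have hsort : (PySem.List.sorted ((nums.zip s.toList).map (pvMove d)) (fun x => x) false).Pairwise (· ≤ ·) := by
    simpa using PySem.List.sorted_pairwise ((nums.zip s.toList).map (pvMove d)) (fun x => x)
  have hinv := (pvFold_inv _ hsort).2
  calc sumDistance nums s d
      = PySem.Int.mod (pvFold (PySem.List.sorted ((nums.zip s.toList).map (pvMove d)) (fun x => x) false)).2 1000000007 := by
        unfold sumDistance
        rw [hmove, htd]
        rfl
    _ = PySem.Int.mod (pvW ((PySem.List.sorted ((nums.zip s.toList).map (pvMove d)) (fun x => x) false).length : Int) (PySem.List.sorted ((nums.zip s.toList).map (pvMove d)) (fun x => x) false) 0 0) 1000000007 := hinv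
    _ = sumDistance_alt nums s d := rfl
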